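-- pv_equiv track=rewrite | github.com/panciut/basketball_tracking | 3DTracking/mv3d_pipeline_const.py | merge_pairs_to_groups
-- ===== SOURCE A (Python) =====
-- def merge_pairs_to_groups(pairs_ij, pairs_jk):
--     triplets = []
--     from collections import defaultdict
--     map_ij = defaultdict(list)
--     for i,j in pairs_ij:
--         map_ij[j].append(i)
--     for j,k in pairs_jk:
--         for i in map_ij.get(j, []):
--             triplets.append((i,j,k))
--     return triplets
-- ===== SOURCE B (Python) =====
-- def merge_pairs_to_groups(pairs_ij, pairs_jk):
--     # Nested scan instead of building a defaultdict index; same output order.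
--     triplets = []
--     for j, k in pairs_jk:
--         for i, jj in pairs_ij:
--             if jj == j:
--                 triplets.append((i, j, k))
--     return triplets
-- ===== Notes on version B (the rewrite author's own statement) =====
-- stated objective: simpler
-- what changed: Replaced the defaultdict index build plus shaped pass with a direct nested scan over pairs_jk and pairs_ij, preserving output order.
import Mathlib
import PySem

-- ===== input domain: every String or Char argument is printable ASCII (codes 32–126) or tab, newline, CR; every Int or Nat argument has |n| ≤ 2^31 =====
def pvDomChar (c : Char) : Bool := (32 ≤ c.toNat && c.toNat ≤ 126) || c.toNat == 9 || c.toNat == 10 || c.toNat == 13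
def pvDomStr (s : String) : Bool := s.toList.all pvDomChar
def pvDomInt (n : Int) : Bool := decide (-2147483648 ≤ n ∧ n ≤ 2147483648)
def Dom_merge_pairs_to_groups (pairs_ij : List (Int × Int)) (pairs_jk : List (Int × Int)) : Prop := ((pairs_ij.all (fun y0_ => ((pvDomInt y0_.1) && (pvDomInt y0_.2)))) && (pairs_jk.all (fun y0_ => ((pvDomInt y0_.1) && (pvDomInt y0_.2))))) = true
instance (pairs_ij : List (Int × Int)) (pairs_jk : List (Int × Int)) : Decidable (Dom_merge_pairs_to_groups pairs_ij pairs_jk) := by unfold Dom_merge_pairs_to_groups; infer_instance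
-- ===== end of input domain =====

-- B replaces A's defaultdict index + shaped pass by a plain nested scan (simpler; same output order).

-- ===== PORT A =====
-- builds map_ij : j ↦ list of i's (defaultdict(list)), then loops over pairs_jk looking each j up
def merge_pairs_to_groups (pairs_ij : List (Int × Int)) (pairs_jk : List (Int × Int)) : List (Int × Int × Int) :=
  let map_ij : PySem.Dict Int (List Int) :=
    pairs_ij.foldl (fun d p => d.modify p.2 [] (· ++ [p.1])) PySem.Dict.empty
  pairs_jk.foldl
    (fun triplets p =>
      (map_ij.getD p.1 []).foldl (fun triplets i => triplets ++ [(i, p.1, p.2)]) triplets)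
    []

-- ===== PORT B =====
-- nested scan: for each (j,k) in pairs_jk, scan pairs_ij for matching second components
def merge_pairs_to_groups_alt (pairs_ij : List (Int × Int)) (pairs_jk : List (Int × Int)) : List (Int × Int × Int) :=
  pairs_jk.foldl
    (fun triplets p =>
      pairs_ij.foldl
        (fun triplets q => if q.2 == p.1 then triplets ++ [(q.1, p.1, p.2)] else triplets)
        triplets)
    []

-- ===== PRECONDITION & SPEC =====
def Spec_merge_pairs_to_groups (pairs_ij : List (Int × Int)) (pairs_jk : List (Int × Int)) (out : List (Int × Int × Int)) : Prop := out = merge_pairs_to_groups_alt pairs_ij pairs_jk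
instance (pairs_ij : List (Int × Int)) (pairs_jk : List (Int × Int)) (out : List (Int × Int × Int)) : Decidable (Spec_merge_pairs_to_groups pairs_ij pairs_jk out) := by unfold Spec_merge_pairs_to_groups; infer_instance

-- ===== CLAIM (what is proved, stated in full; the proofs are below) =====
def Claim_equal_merge_pairs_to_groups : Prop := ∀ (pairs_ij : List (Int × Int)) (pairs_jk : List (Int × Int)), Dom_merge_pairs_to_groups pairs_ij pairs_jk → Spec_merge_pairs_to_groups pairs_ij pairs_jk (merge_pairs_to_groups pairs_ij pairs_jk)

-- ===== LEMMAS AND PROOFS =====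

-- the dict built by A's first loop holds, at key j, the i's of pairs with second component j, in order
theorem getD_build_map (l : List (Int × Int)) (d : PySem.Dict Int (List Int)) (j : Int) :
    (l.foldl (fun d p => d.modify p.2 [] (· ++ [p.1])) d).getD j []
      = d.getD j [] ++ (l.filter (fun p => p.2 == j)).map (·.1) := by
  induction l generalizing d with
  | nil => simp
  | cons q l ih =>
    simp only [List.foldl_cons, ih, List.filter_cons]
    by_cases h : q.2 = j
    · simp [h]
    · simp [PySem.Dict.getD_modify, h, Ne.symm h]

-- A's inner loop over a looked-up list appends the triplets in order
theorem foldl_append_triplets (xs : List Int) (acc : List (Int × Int × Int)) (j k : Int) :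
    xs.foldl (fun t i => t ++ [(i, j, k)]) acc = acc ++ xs.map (fun i => (i, j, k)) := by
  induction xs generalizing acc with
  | nil => simp
  | cons x xs ih => simp [ih]

-- B's inner scan collects the same triplets
theorem foldl_scan_triplets (l : List (Int × Int)) (acc : List (Int × Int × Int)) (j k : Int) :
    l.foldl (fun t q => if q.2 == j then t ++ [(q.1, j, k)] else t) acc
      = acc ++ ((l.filter (fun p => p.2 == j)).map (·.1)).map (fun i => (i, j, k)) := by
  induction l generalizing acc with
  | nil => simp
  | cons q l ih =>
    by_cases h : (q.2 == j) = true
    · simp only [List.foldl_cons, List.filter_cons, h, if_true, ih, List.map_cons,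
        List.map_map, List.append_assoc, List.singleton_append]
    · simp only [List.foldl_cons, List.filter_cons, h, if_false, ih, Bool.false_eq_true]

-- ===== VERDICT (by name: the statement is the Claim_ definition above) =====
theorem merge_pairs_to_groups_spec : Claim_equal_merge_pairs_to_groups := by
  intro pairs_ij pairs_jk _
  show merge_pairs_to_groups _ _ = merge_pairs_to_groups_alt _ _
  unfold merge_pairs_to_groups merge_pairs_to_groups_alt
  dsimp only
  congr 1
  funext acc p
  rw [getD_build_map, foldl_append_triplets, foldl_scan_triplets]
  simp
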